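-- pv_equiv track=rewrite | github.com/mojtaba-eshghie/InvPurge | InvCon+/src/similarty.py | recursive_parse
-- ===== SOURCE A (Python) =====
-- def recursive_parse(a: str):
--     """Uses regex to clean daikon expression from [...], Sum(), ori() """
--     if(a.startswith("ori") or a.startswith("Sum")):
--         a = a[4:]
--         a = a[0:-1]
--         a = recursive_parse(a)
--
--     if(a.endswith("[...]")):
--         a = a[0:-5]
--         a += "[spreadOperator]"
--
--     return a
-- ===== SOURCE B (Python) =====
-- def recursive_parse(a: str):
--     """Index-based: track (lo, hi) window instead of slicing per wrapper level."""
--     lo, hi = 0, len(a)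
--     while a[lo:min(lo + 3, hi)] in ("ori", "Sum"):
--         lo, hi = lo + 4, hi - 1
--     a = a[lo:hi]
--     if a.endswith("[...]"):
--         a = a[0:-5] + "[spreadOperator]"
--     return a
-- ===== Notes on version B (the rewrite author's own statement) =====
-- stated objective: alternative
-- what changed: Replaces the recursion that re-slices the string at every wrapper level (and re-runs the suffix check per level) by an index window (lo, hi) advanced over the original string, one final slice, and a single [...]-suffix replacement; a replaced string can never end with [...] again, so one replacement suffices.
import Mathlib
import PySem

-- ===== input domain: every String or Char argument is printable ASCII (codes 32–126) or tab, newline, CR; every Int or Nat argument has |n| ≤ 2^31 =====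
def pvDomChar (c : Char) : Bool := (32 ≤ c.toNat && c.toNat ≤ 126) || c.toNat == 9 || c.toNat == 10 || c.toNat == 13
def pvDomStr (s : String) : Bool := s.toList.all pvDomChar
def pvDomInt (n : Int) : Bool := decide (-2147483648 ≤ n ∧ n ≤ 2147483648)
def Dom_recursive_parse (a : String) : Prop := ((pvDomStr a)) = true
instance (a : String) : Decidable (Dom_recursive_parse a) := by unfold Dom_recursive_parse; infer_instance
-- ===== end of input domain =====

-- B replaces A's per-level recursive slicing by an index window (lo, hi) advanced over the
-- original string, one final slice, and a single [...]-suffix replacement; objective: alternative.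

-- ===== PORT A =====
-- A's recursion on the code-point list; the Nat fuel is only a totality guard (each recursive
-- call is on a string shorter by 5, so fuel = length + 1 in the wrapper below never runs out)
def recParseA : Nat → List Char → List Char
  | 0, cs => cs
  | fuel + 1, cs =>
    -- if a.startswith("ori") or a.startswith("Sum"): a = a[4:]; a = a[0:-1]; a = recursive_parse(a)
    let a :=
      if (PySem.Chars.startswith cs "ori".toList || PySem.Chars.startswith cs "Sum".toList) = true then
        recParseA fuel (PySem.List.slice (PySem.List.slice cs (some 4) none) (some 0) (some (-1)))
      else cs
    -- if a.endswith("[...]"): a = a[0:-5]; a += "[spreadOperator]"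
    if PySem.Chars.endswith a "[...]".toList then
      PySem.List.slice a (some 0) (some (-5)) ++ "[spreadOperator]".toList
    else a

def recursive_parse (a : String) : String :=
  String.ofList (recParseA (a.toList.length + 1) a.toList)

-- ===== PORT B =====
-- lo, hi = 0, len(a); while a[lo:min(lo+3, hi)] in ("ori", "Sum"): lo, hi = lo+4, hi-1
-- (fueled loop; each iteration shrinks the window by 5, so fuel = length + 1 suffices)
def peelIdx : Nat → List Char → Nat → Nat → Nat × Nat
  | 0, _, lo, hi => (lo, hi)
  | fuel + 1, cs, lo, hi =>
    if ((cs.take (min (lo + 3) hi)).drop lo = "ori".toList ∨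
        (cs.take (min (lo + 3) hi)).drop lo = "Sum".toList) then
      peelIdx fuel cs (lo + 4) (hi - 1)
    else (lo, hi)

-- a = a[lo:hi]; if a.endswith("[...]"): a = a[0:-5] + "[spreadOperator]"
def recursive_parse_alt (a : String) : String :=
  let cs := a.toList
  let p := peelIdx (cs.length + 1) cs 0 cs.length
  let core := PySem.List.slice cs (some (p.1 : Int)) (some (p.2 : Int))
  String.ofList
    (if PySem.Chars.endswith core "[...]".toList then
       PySem.List.slice core (some 0) (some (-5)) ++ "[spreadOperator]".toList
     else core)

-- ===== PRECONDITION & SPEC =====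
def Spec_recursive_parse (a : String) (out : String) : Prop := out = recursive_parse_alt a
instance (a : String) (out : String) : Decidable (Spec_recursive_parse a out) := by unfold Spec_recursive_parse; infer_instance

-- ===== CLAIM (what is proved, stated in full; the proofs are below) =====
def Claim_equal_recursive_parse : Prop := ∀ (a : String), Dom_recursive_parse a → Spec_recursive_parse a (recursive_parse a)

-- ===== LEMMAS AND PROOFS =====

-- the shared suffix-replacement step, for the proofs only
def post (x : List Char) : List Char :=
  if PySem.Chars.endswith x "[...]".toList then
    PySem.List.slice x (some 0) (some (-5)) ++ "[spreadOperator]".toList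
  else x

lemma endswith_append_spread (y : List Char) :
    PySem.Chars.endswith (y ++ "[spreadOperator]".toList) "[...]".toList = false := by
  rw [Bool.eq_false_iff]
  intro h
  rw [PySem.Chars.endswith_iff] at h
  have h2 : "[...]".toList.reverse <+: "[spreadOperator]".toList.reverse ++ y.reverse := by
    rw [← List.reverse_append]; exact List.reverse_prefix.mpr h
  have h3 := (List.isPrefix_append_of_length (by decide)).mp h2
  revert h3; decide

lemma post_endswith_false (x : List Char) :
    PySem.Chars.endswith (post x) "[...]".toList = false := by
  unfold post
  split
  · exact endswith_append_spread _
  · rename_i h; exact Bool.eq_false_iff.mpr h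

lemma post_post (x : List Char) : post (post x) = post x := by
  conv_lhs => rw [post]
  rw [post_endswith_false]
  simp

-- B's loop window a[lo:min(lo+3,hi)] is the first three chars of the current string a[lo:hi]
lemma win_take3 (cs : List Char) (lo hi : Nat) :
    (cs.take (min (lo + 3) hi)).drop lo = ((cs.take hi).drop lo).take 3 := by
  have h1 : cs.take (min (lo + 3) hi) = (cs.take hi).take (lo + 3) := by
    rw [List.take_take]
  rw [h1, List.drop_take]
  congr 1
  omega

-- the two loop conditions agree
lemma cond_iff (cur : List Char) :
    (PySem.Chars.startswith cur "ori".toList || PySem.Chars.startswith cur "Sum".toList) = true ↔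
      (cur.take 3 = "ori".toList ∨ cur.take 3 = "Sum".toList) := by
  rw [Bool.or_eq_true, PySem.Chars.startswith_iff, PySem.Chars.startswith_iff,
    List.prefix_iff_eq_take, List.prefix_iff_eq_take]
  have h1 : ("ori".toList).length = 3 := by decide
  have h2 : ("Sum".toList).length = 3 := by decide
  rw [h1, h2]
  constructor
  · rintro (h | h)
    · exact Or.inl h.symm
    · exact Or.inr h.symm
  · rintro (h | h)
    · exact Or.inl h.symm
    · exact Or.inr h.symm

-- one peel of A on the window string equals shrinking the window
lemma step_eq (cs : List Char) (lo hi : Nat) (hhi : hi ≤ cs.length) :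
    PySem.List.slice (PySem.List.slice ((cs.take hi).drop lo) (some 4) none) (some 0) (some (-1))
      = (cs.take (hi - 1)).drop (lo + 4) := by
  rw [PySem.List.slice_from _ (by omega : (0:Int) ≤ 4)]
  simp only [PySem.List.slice_zero_start, PySem.List.slice_to_neg_one, show ((4:Int).toNat) = 4 from rfl]
  rw [List.drop_drop, List.dropLast_eq_take, List.drop_take, List.drop_take, List.take_take]
  simp only [List.length_take, List.length_drop]
  congr 1
  omega

-- the B-condition forces a window of at least three characters
lemma cond_window_ge (cs : List Char) (lo hi : Nat)
    (hb : (cs.take (min (lo + 3) hi)).drop lo = "ori".toList ∨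
          (cs.take (min (lo + 3) hi)).drop lo = "Sum".toList) :
    lo + 3 ≤ hi := by
  have hw : ((cs.take (min (lo + 3) hi)).drop lo).length = 3 := by
    rcases hb with h' | h' <;> rw [h'] <;> decide
  simp only [List.length_drop, List.length_take] at hw
  omega

-- A's recursion on the window string equals one suffix step after B's index loop
lemma recParseA_eq_idx (cs : List Char) :
    ∀ f1 f2 lo hi, hi ≤ cs.length → hi - lo < f1 → hi - lo < f2 →
      recParseA f1 ((cs.take hi).drop lo) =
        post ((cs.take (peelIdx f2 cs lo hi).2).drop (peelIdx f2 cs lo hi).1) := by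
  intro f1
  induction f1 with
  | zero => intro f2 lo hi _ h1 _; omega
  | succ n ih =>
    intro f2 lo hi hhi h1 h2
    match f2, h2 with
    | m + 1, h2 =>
      by_cases hb : ((cs.take (min (lo + 3) hi)).drop lo = "ori".toList ∨
                     (cs.take (min (lo + 3) hi)).drop lo = "Sum".toList)
      · have hge := cond_window_ge cs lo hi hb
        have hb' := hb
        rw [win_take3] at hb'
        have hcond : (PySem.Chars.startswith ((cs.take hi).drop lo) "ori".toList ||
            PySem.Chars.startswith ((cs.take hi).drop lo) "Sum".toList) = true :=
          (cond_iff _).mpr hb'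
        show post _ = _
        rw [if_pos hcond, step_eq cs lo hi hhi,
          ih m (lo + 4) (hi - 1) (by omega) (by omega) (by omega)]
        rw [post_post]
        rw [show peelIdx (m + 1) cs lo hi = peelIdx m cs (lo + 4) (hi - 1) from by
          rw [peelIdx]; rw [if_pos hb]]
      · have hb' : ¬ (((cs.take hi).drop lo).take 3 = "ori".toList ∨
                      ((cs.take hi).drop lo).take 3 = "Sum".toList) := by
          rw [← win_take3]; exact hb
        have hcond : ¬ (PySem.Chars.startswith ((cs.take hi).drop lo) "ori".toList ||
            PySem.Chars.startswith ((cs.take hi).drop lo) "Sum".toList) = true := by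
          intro h; exact hb' ((cond_iff _).mp h)
        show post _ = _
        rw [if_neg hcond]
        rw [show peelIdx (m + 1) cs lo hi = (lo, hi) from by rw [peelIdx]; rw [if_neg hb]]

-- ===== VERDICT (by name: the statement is the Claim_ definition above) =====
theorem recursive_parse_spec : Claim_equal_recursive_parse := by
  intro a _
  unfold Spec_recursive_parse recursive_parse recursive_parse_alt
  have h := recParseA_eq_idx a.toList (a.toList.length + 1) (a.toList.length + 1)
    0 a.toList.length le_rfl (by omega) (by omega)
  rw [List.take_length, List.drop_zero] at h
  have hcore : PySem.List.slice a.toList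
      (some (((peelIdx (a.toList.length + 1) a.toList 0 a.toList.length).1 : Nat) : Int))
      (some (((peelIdx (a.toList.length + 1) a.toList 0 a.toList.length).2 : Nat) : Int)) =
      (a.toList.take (peelIdx (a.toList.length + 1) a.toList 0 a.toList.length).2).drop
        (peelIdx (a.toList.length + 1) a.toList 0 a.toList.length).1 := by
    rw [PySem.List.slice_natCast, List.drop_take]
  simp only [hcore]
  rw [h]
  rfl
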